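-- pv_equiv track=rewrite | github.com/dasvirj/TCC | ag_adriana.py | somadiscsemestres
-- ===== SOURCE A (Python) =====
-- def somadiscsemestres(aux):
--   pesossomadiscsem = 0
--   for i in range(len(aux)):
--     if (aux[i] > 7):
--       pesossomadiscsem += 3 #(maxsemestres-4) # maxsemestres menos 2 anos
--     elif (aux[i] == 2):
--       pesossomadiscsem += 1
--     elif (aux[i] == 1):
--       pesossomadiscsem += 2
--   return pesossomadiscsem
-- ===== SOURCE B (Python) =====
-- def somadiscsemestres(aux):
--   return 3 * sum(1 for x in aux if x > 7) + aux.count(2) + 2 * aux.count(1)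
-- ===== Notes on version B (the rewrite author's own statement) =====
-- stated objective: simpler
-- what changed: Replaces the index-loop with its branching accumulator by a one-line closed formula: 3*(count of elements > 7) + count(2) + 2*count(1), valid because the three categories are disjoint.
import Mathlib
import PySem

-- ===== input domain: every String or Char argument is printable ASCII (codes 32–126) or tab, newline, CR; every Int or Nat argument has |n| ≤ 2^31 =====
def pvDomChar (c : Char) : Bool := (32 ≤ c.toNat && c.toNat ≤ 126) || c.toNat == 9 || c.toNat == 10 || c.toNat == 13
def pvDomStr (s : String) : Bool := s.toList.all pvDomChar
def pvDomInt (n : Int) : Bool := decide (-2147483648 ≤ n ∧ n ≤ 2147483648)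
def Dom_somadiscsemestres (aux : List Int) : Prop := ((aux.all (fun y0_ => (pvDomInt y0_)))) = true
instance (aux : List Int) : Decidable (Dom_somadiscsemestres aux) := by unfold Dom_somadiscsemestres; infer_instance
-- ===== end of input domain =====

-- ===== PORT A =====
-- one honest line: B replaces A's branching index-loop with a closed formula over category counts (simpler)
def somadiscsemestres (aux : List Int) : Int :=
  (PySem.List.pyRange 0 aux.length 1).foldl
    (fun pesossomadiscsem i =>
      if PySem.List.pyGetD aux i 0 > 7 then pesossomadiscsem + 3
      else if PySem.List.pyGetD aux i 0 = 2 then pesossomadiscsem + 1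
      else if PySem.List.pyGetD aux i 0 = 1 then pesossomadiscsem + 2
      else pesossomadiscsem) 0

-- ===== PORT B =====
def somadiscsemestres_alt (aux : List Int) : Int :=
  3 * (aux.countP (fun x => x > 7) : Int) + (aux.count 2 : Int) + 2 * (aux.count 1 : Int)

-- ===== PRECONDITION & SPEC =====
def Spec_somadiscsemestres (aux : List Int) (out : Int) : Prop := out = somadiscsemestres_alt aux
instance (aux : List Int) (out : Int) : Decidable (Spec_somadiscsemestres aux out) := by unfold Spec_somadiscsemestres; infer_instance

-- ===== CLAIM (what is proved, stated in full; the proofs are below) =====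
def Claim_equal_somadiscsemestres : Prop := ∀ (aux : List Int), Dom_somadiscsemestres aux → Spec_somadiscsemestres aux (somadiscsemestres aux)

-- ===== LEMMAS AND PROOFS =====

-- ===== VERDICT (by name: the statement is the Claim_ definition above) =====
theorem pvA_foldl (xs : List Int) (s : Int) :
    xs.foldl
      (fun pesossomadiscsem x =>
        if x > 7 then pesossomadiscsem + 3
        else if x = 2 then pesossomadiscsem + 1
        else if x = 1 then pesossomadiscsem + 2
        else pesossomadiscsem) s
    = s + 3 * (xs.countP (fun x => x > 7) : Int) + (xs.count 2 : Int) + 2 * (xs.count 1 : Int) := by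
  induction xs generalizing s with
  | nil => simp
  | cons a xs ih =>
    simp only [List.foldl_cons, List.countP_cons, List.count_cons, ih]
    by_cases h7 : a > 7
    · have h2 : a ≠ 2 := by omega
      have h1 : a ≠ 1 := by omega
      simp [h7, h2, h1]; ring
    · by_cases h2 : a = 2
      · subst h2; simp; ring
      · by_cases h1 : a = 1
        · subst h1; simp; ring
        · simp [h7, h2, h1]

theorem somadiscsemestres_spec : Claim_equal_somadiscsemestres := by
  intro aux _
  unfold Spec_somadiscsemestres somadiscsemestres somadiscsemestres_alt
  rw [PySem.List.foldl_pyRange_zero_pyGetD' aux 0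
    (fun pesossomadiscsem x =>
      if x > 7 then pesossomadiscsem + 3
      else if x = 2 then pesossomadiscsem + 1
      else if x = 1 then pesossomadiscsem + 2
      else pesossomadiscsem) 0]
  rw [pvA_foldl]
  ring
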